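-- pv_equiv track=rewrite | github.com/RamnathShanbhag/APS-2020 | picking_numbers.py | count_int
-- ===== SOURCE A (Python) =====
-- def count_int(a,n):
--     d=1
--     maxi=0
--     for i in a:
--         val1=a.count(i)
--         val2=a.count(i-d)
--         maxi=max(maxi,val1+val2)
--     return maxi
-- ===== SOURCE B (Python) =====
-- def count_int(a, n):
--     s = sorted(a)
--     maxi = 0
--     prev_val = None
--     prev_len = 0
--     i = 0
--     m = len(s)
--     while i < m:
--         v = s[i]
--         j = i + 1
--         while j < m and s[j] == v:
--             j += 1
--         run_len = j - i
--         cand = run_len + (prev_len if prev_val == v - 1 else 0)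
--         maxi = max(maxi, cand)
--         prev_val = v
--         prev_len = run_len
--         i = j
--     return maxi
-- ===== Notes on version B (the rewrite author's own statement) =====
-- stated objective: faster
-- what changed: Sorts a copy of the list and makes one grouping pass over runs of equal values, adding the previous run's length when its value is v-1, instead of A's two full count() scans per element.
import Mathlib
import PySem

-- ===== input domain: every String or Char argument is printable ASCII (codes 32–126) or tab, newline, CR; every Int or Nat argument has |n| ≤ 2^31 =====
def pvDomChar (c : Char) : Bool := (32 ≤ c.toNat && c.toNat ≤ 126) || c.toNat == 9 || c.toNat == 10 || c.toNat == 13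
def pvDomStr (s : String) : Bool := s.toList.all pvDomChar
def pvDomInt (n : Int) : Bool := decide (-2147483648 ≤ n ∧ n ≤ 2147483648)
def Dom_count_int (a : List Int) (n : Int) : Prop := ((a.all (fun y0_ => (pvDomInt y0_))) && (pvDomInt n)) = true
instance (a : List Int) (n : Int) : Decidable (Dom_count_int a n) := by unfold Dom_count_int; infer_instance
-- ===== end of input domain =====

-- B sorts a copy of the list and makes one grouping pass over runs of equal values
-- (adding the previous run's length when its value is v-1), instead of A's two count() scans per element.

-- ===== PORT A =====
def count_int (a : List Int) (n : Int) : Int :=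
  let d : Int := 1
  a.foldl (fun maxi i => max maxi ((a.count i : Int) + (a.count (i - d) : Int))) 0

-- ===== PORT B =====
-- one step of Source B's outer while loop: scan the run of the head value (the inner while),
-- combine with the previous run, recurse on the remainder
def pvRunLoop (t : List Int) (prevVal : Option Int) (prevLen maxi : Int) : Int :=
  match t with
  | [] => maxi
  | v :: rest =>
    let run := rest.takeWhile (fun x => x == v)
    let t' := rest.dropWhile (fun x => x == v)
    let runLen : Int := 1 + run.length
    let cand := runLen + (if prevVal = some (v - 1) then prevLen else 0)
    pvRunLoop t' (some v) runLen (max maxi cand)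
termination_by t.length
decreasing_by
  simp only [List.length_cons]
  have := (List.dropWhile_sublist (l := rest) (p := fun x => x == v)).length_le
  omega

def count_int_alt (a : List Int) (n : Int) : Int :=
  pvRunLoop (PySem.List.sorted a (fun x => x) false) none 0 0

-- ===== PRECONDITION & SPEC =====
def Spec_count_int (a : List Int) (n : Int) (out : Int) : Prop := out = count_int_alt a n
instance (a : List Int) (n : Int) (out : Int) : Decidable (Spec_count_int a n out) := by unfold Spec_count_int; infer_instance

-- ===== CLAIM (what is proved, stated in full; the proofs are below) =====
def Claim_equal_count_int : Prop := ∀ (a : List Int) (n : Int), Dom_count_int a n → Spec_count_int a n (count_int a n)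

-- ===== LEMMAS AND PROOFS =====

-- folding max over a block of elements with a common value is one max
theorem pv_foldl_max_const (g : Int → Int) (l : List Int) (c m : Int)
    (h : ∀ x ∈ l, g x = c) :
    l.foldl (fun acc x => max acc (g x)) (max m c) = max m c := by
  induction l with
  | nil => rfl
  | cons x t ih =>
    simp only [List.foldl_cons, h x List.mem_cons_self, max_assoc, max_self]
    exact ih (fun y hy => h y (List.mem_cons_of_mem _ hy))

-- main invariant: on a sorted suffix t whose elements all exceed the previous run's
-- value, pvRunLoop computes the max-fold of count_t x + (previous-run-aware) count_t (x-1)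
theorem pv_runLoop_inv : ∀ (k : Nat) (t : List Int), t.length ≤ k →
    t.Pairwise (· ≤ ·) →
    ∀ (pv : Option Int) (pL m : Int), (∀ x ∈ t, ∀ p, pv = some p → p < x) →
    pvRunLoop t pv pL m =
      t.foldl (fun acc x => max acc ((t.count x : Int) +
        (if pv = some (x - 1) then pL else (t.count (x - 1) : Int)))) m := by
  intro k
  induction k with
  | zero =>
    intro t ht _ pv pL m _
    have : t = [] := List.eq_nil_of_length_eq_zero (Nat.le_zero.mp ht)
    subst this; simp [pvRunLoop]
  | succ k ih =>
    intro t ht hsorted pv pL m hpv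
    match t with
    | [] => simp [pvRunLoop]
    | v :: rest =>
      have hvle : ∀ x ∈ rest, v ≤ x := fun x hx => (List.pairwise_cons.mp hsorted).1 x hx
      have hrestsorted := (List.pairwise_cons.mp hsorted).2
      set run := rest.takeWhile (fun x => x == v) with hrun
      set t' := rest.dropWhile (fun x => x == v) with ht'
      have hsplit : rest = run ++ t' := (List.takeWhile_append_dropWhile).symm
      -- every element of the run equals v
      have hrunv : ∀ x ∈ run, x = v := by
        intro x hx
        have := List.mem_takeWhile_imp hx
        simpa using this
      -- every element of t' is > v
      have ht'gt : ∀ x ∈ t', v < x := by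
        match h' : t' with
        | [] => intro x hx; simp at hx
        | w :: ws =>
          have hd : rest.dropWhile (fun x => x == v) = w :: ws := ht'.symm
          have hwne : w ≠ v := by
            have := List.head?_dropWhile_not (fun x => x == v) rest
            rw [hd] at this; simpa using this
          have hwmem : w ∈ rest := by
            rw [hsplit]; exact List.mem_append_right _ List.mem_cons_self
          have hvw : v < w := lt_of_le_of_ne (hvle w hwmem) (Ne.symm hwne)
          have hws : (w :: ws).Pairwise (· ≤ ·) := hd ▸ hrestsorted.sublist (List.dropWhile_sublist _)
          intro x hx
          rcases List.mem_cons.mp hx with rfl | hx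
          · exact hvw
          · exact lt_of_lt_of_le hvw ((List.pairwise_cons.mp hws).1 x hx)
      have ht'sorted : t'.Pairwise (· ≤ ·) := hrestsorted.sublist (List.dropWhile_sublist _)
      have ht'len : t'.length ≤ k := by
        have h1 : rest.length + 1 ≤ k + 1 := by simpa using ht
        have h2 := (List.dropWhile_sublist (l := rest) (p := fun x => x == v)).length_le
        rw [ht']; omega
      -- counts in t = v :: run ++ t'
      have hcount : ∀ y, (v :: rest).count y =
          (if y = v then 1 + run.length else 0) + t'.count y := by
        intro y
        rw [hsplit, ← List.cons_append, List.count_append]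
        congr 1
        by_cases hy : y = v
        · subst hy
          have hr : run.count y = run.length :=
            List.count_eq_length.mpr (fun b hb => (hrunv b hb).symm)
          simp [List.count_cons_self, hr, Nat.add_comm]
        · simp only [if_neg hy]
          exact List.count_eq_zero.mpr (fun hy' => by
            rcases List.mem_cons.mp hy' with rfl | hy''
            · exact hy rfl
            · exact hy (hrunv y hy''))
      have hct0 : t'.count v = 0 :=
        List.count_eq_zero.mpr (fun hm => absurd (ht'gt _ hm) (by omega))
      have hcv : ((v :: rest).count v : Int) = 1 + run.length := by
        rw [hcount v]; simp [hct0]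
      have hcvm1 : ((v :: rest).count (v - 1) : Int) = 0 := by
        rw [hcount (v - 1)]
        have h1 : ¬ (v - 1 = v) := by omega
        have h2 : t'.count (v - 1) = 0 := List.count_eq_zero.mpr
          (fun hm => absurd (ht'gt _ hm) (by omega))
        simp [h1, h2]
      -- counts of elements of t' agree between t and t'
      have hct' : ∀ y, v < y → ((v :: rest).count y : Int) = t'.count y := by
        intro y hy
        rw [hcount y]; have : ¬ (y = v) := by omega
        simp [this]
      -- unfold one step of pvRunLoop
      rw [pvRunLoop]
      simp only [← hrun, ← ht']
      -- the top-level g for this step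
      set g : Int → Int := fun x => ((v :: rest).count x : Int) +
        (if pv = some (x - 1) then pL else ((v :: rest).count (x - 1) : Int)) with hg
      have hcand : (1 + (run.length : Int)) + (if pv = some (v - 1) then pL else 0) = g v := by
        rw [hg]; simp only []
        rw [hcv, hcvm1]
      -- rewrite the RHS fold: first the run block, then t'
      have hfold : (v :: rest).foldl (fun acc x => max acc (g x)) m =
          t'.foldl (fun acc x => max acc (g x)) (max m (g v)) := by
        rw [hsplit, ← List.cons_append, List.foldl_append]
        congr 1
        have : (v :: run).foldl (fun acc x => max acc (g x)) m =
            run.foldl (fun acc x => max acc (g x)) (max m (g v)) := by simp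
        rw [this]
        exact pv_foldl_max_const g run (g v) m (fun x hx => by rw [hrunv x hx])
      -- g agrees with the recursive step's function on t'
      have hgt' : ∀ x ∈ t', g x = (t'.count x : Int) +
          (if some v = some (x - 1) then (1 + (run.length : Int)) else (t'.count (x - 1) : Int)) := by
        intro x hx
        have hvx := ht'gt x hx
        rw [hg]; simp only []
        rw [hct' x hvx]
        congr 1
        by_cases hxv : x - 1 = v
        · have hp : ¬ pv = some (x - 1) := by
            intro hpv'
            have := hpv v List.mem_cons_self _ hpv'
            omega
          rw [if_neg hp, if_pos (by rw [hxv]), hxv, hcv]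
        · have hvlt : v < x - 1 := lt_of_le_of_ne (by omega) (fun h => hxv h.symm)
          have hp : ¬ pv = some (x - 1) := by
            intro hpv'
            have := hpv v List.mem_cons_self _ hpv'
            omega
          rw [if_neg hp, if_neg (by intro h; exact hxv (Option.some.inj h).symm),
            hct' (x - 1) hvlt]
      rw [ih t' ht'len ht'sorted (some v) (1 + run.length) (max m ((1 + (run.length : Int)) + (if pv = some (v - 1) then pL else 0)))
            (fun x hx p hp => by injection hp with hp; subst hp; exact ht'gt x hx),
          hcand, hfold]
      exact (PySem.List.foldl_congr_mem t' _ _ _ (fun acc x hx => by rw [hgt' x hx])).symm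

-- max-fold helpers (depend only on membership)
theorem pv_init_le (f : Int → Int) : ∀ (l : List Int) (c : Int),
    c ≤ l.foldl (fun m v => max m (f v)) c := by
  intro l
  induction l with
  | nil => intro c; simp
  | cons x t ih =>
    intro c
    calc c ≤ max c (f x) := le_max_left _ _
      _ ≤ _ := ih _

theorem pv_mem_le (f : Int → Int) : ∀ (l : List Int) (c : Int) (x : Int), x ∈ l →
    f x ≤ l.foldl (fun m v => max m (f v)) c := by
  intro l
  induction l with
  | nil => intro c x hx; simp at hx
  | cons y t ih =>
    intro c x hx
    rcases List.mem_cons.mp hx with h | h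
    · subst h
      calc f x ≤ max c (f x) := le_max_right _ _
        _ ≤ _ := pv_init_le f t _
    · exact ih _ x h

theorem pv_fold_le (f : Int → Int) : ∀ (l : List Int) (c M : Int), c ≤ M →
    (∀ x ∈ l, f x ≤ M) → l.foldl (fun m v => max m (f v)) c ≤ M := by
  intro l
  induction l with
  | nil => intro c M hc _; simpa using hc
  | cons y t ih =>
    intro c M hc hb
    exact ih _ M (max_le hc (hb y (List.mem_cons_self))) fun x hx => hb x (List.mem_cons_of_mem _ hx)

theorem pv_fold_ext (f : Int → Int) (l₁ l₂ : List Int) (h : ∀ x, x ∈ l₁ ↔ x ∈ l₂) :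
    l₁.foldl (fun m v => max m (f v)) 0 = l₂.foldl (fun m v => max m (f v)) 0 := by
  apply le_antisymm
  · exact pv_fold_le f l₁ 0 _ (pv_init_le f l₂ 0)
      (fun x hx => pv_mem_le f l₂ 0 x ((h x).mp hx))
  · exact pv_fold_le f l₂ 0 _ (pv_init_le f l₁ 0)
      (fun x hx => pv_mem_le f l₁ 0 x ((h x).mpr hx))

-- ===== VERDICT (by name: the statement is the Claim_ definition above) =====
theorem count_int_spec : Claim_equal_count_int := by
  intro a n _
  unfold Spec_count_int count_int count_int_alt
  set s := PySem.List.sorted a (fun x => x) false with hs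
  have hperm : s.Perm a := PySem.List.sorted_perm a (fun x => x) false
  have hsorted : s.Pairwise (· ≤ ·) := by
    have := PySem.List.sorted_pairwise (xs := a) (key := fun x => x)
    simpa using this
  rw [pv_runLoop_inv s.length s le_rfl hsorted none 0 0 (fun x _ p hp => by cases hp)]
  simp only [reduceCtorEq, if_false]
  have hcnt : ∀ y, (s.count y : Int) = a.count y := fun y => by
    exact_mod_cast hperm.count_eq y
  calc a.foldl (fun maxi i => max maxi ((a.count i : Int) + (a.count (i - 1) : Int))) 0
      = s.foldl (fun maxi i => max maxi ((a.count i : Int) + (a.count (i - 1) : Int))) 0 :=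
        pv_fold_ext _ a s (fun x => ⟨fun h => (hperm.mem_iff).mpr h, fun h => (hperm.mem_iff).mp h⟩)
    _ = s.foldl (fun maxi i => max maxi ((s.count i : Int) + (s.count (i - 1) : Int))) 0 :=
        PySem.List.foldl_congr_mem s _ _ _ (fun acc x _ => by rw [hcnt x, hcnt (x - 1)])
    _ = _ := rfl
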